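-- pv_equiv track=rewrite | github.com/CarlElias/Optimisation-Probl-me-des-8-Reines | 3- Méthode TABOUS/8Reine.py | f
-- ===== SOURCE A (Python) =====
-- def f(tab):
--     cmpt = 0
--     #Verification colonne
--     for i in range(8):
--         for j in range(8):
--             if ( (tab[i] == tab[j]) and (i != j) ):
--                 cmpt += 1
--     #Verification Ligne
--     for i in range(8):
--         for j in range(8):
--             if ( ( abs(tab[i] - tab[j]) == abs(i-j) ) and (i != j) ):
--                 cmpt += 1
--     return cmpt
-- ===== SOURCE B (Python) =====
-- def f(tab):
--     col = {}
--     diag = {}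
--     anti = {}
--     for i in range(8):
--         v = tab[i]
--         col[v] = col.get(v, 0) + 1
--         diag[i - v] = diag.get(i - v, 0) + 1
--         anti[i + v] = anti.get(i + v, 0) + 1
--     total = 0
--     for d in (col, diag, anti):
--         for c in d.values():
--             total += c * (c - 1)
--     return total
-- ===== Notes on version B (the rewrite author's own statement) =====
-- stated objective: alternative
-- what changed: Replaced the two 8x8 nested index-pair scans with a single pass over range(8) building three frequency tables (column, diagonal i-v, anti-diagonal i+v) and summing c*(c-1) over each table's counts.
import Mathlib
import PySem

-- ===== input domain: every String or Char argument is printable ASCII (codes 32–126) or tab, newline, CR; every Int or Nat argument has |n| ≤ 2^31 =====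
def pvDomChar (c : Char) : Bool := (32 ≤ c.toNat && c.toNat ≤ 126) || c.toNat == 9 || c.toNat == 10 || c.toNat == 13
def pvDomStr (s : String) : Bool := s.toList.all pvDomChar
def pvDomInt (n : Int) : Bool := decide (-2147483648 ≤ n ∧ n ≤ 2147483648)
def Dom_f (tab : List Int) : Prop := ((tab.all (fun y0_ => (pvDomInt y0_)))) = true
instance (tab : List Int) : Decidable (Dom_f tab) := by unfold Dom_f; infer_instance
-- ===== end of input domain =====

-- B replaces A's two 8x8 nested index-pair scans by one pass over range(8) building three
-- frequency tables (column, diagonal, anti-diagonal) and summing c*(c-1) over their counts.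

-- ===== PORT A =====
-- tab[i] is ported as pyGetD tab i 0; Pre_f guarantees every index 0..7 is in range,
-- where pyGetD agrees with Python's tab[i] (outside Pre_f the Python raises IndexError).
def f (tab : List Int) : Int :=
  let cmpt : Int := (PySem.List.pyRange 0 8 1).foldl (fun c i =>
      (PySem.List.pyRange 0 8 1).foldl (fun c j =>
        if PySem.List.pyGetD tab i 0 = PySem.List.pyGetD tab j 0 ∧ i ≠ j then c + 1 else c) c) 0
  (PySem.List.pyRange 0 8 1).foldl (fun c i =>
      (PySem.List.pyRange 0 8 1).foldl (fun c j =>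
        if |PySem.List.pyGetD tab i 0 - PySem.List.pyGetD tab j 0| = |i - j| ∧ i ≠ j
        then c + 1 else c) c) cmpt

-- ===== PORT B =====
-- d[k] = d.get(k, 0) + 1 is ported as Dict.insert k (Dict.getD d k 0 + 1); the three dicts
-- travel in one triple, exactly as the single Python loop updates all three per iteration.
def f_alt (tab : List Int) : Int :=
  let s := (PySem.List.pyRange 0 8 1).foldl
    (fun (s : PySem.Dict Int Int × PySem.Dict Int Int × PySem.Dict Int Int) i =>
      (s.1.insert (PySem.List.pyGetD tab i 0) (s.1.getD (PySem.List.pyGetD tab i 0) 0 + 1),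
       s.2.1.insert (i - PySem.List.pyGetD tab i 0) (s.2.1.getD (i - PySem.List.pyGetD tab i 0) 0 + 1),
       s.2.2.insert (i + PySem.List.pyGetD tab i 0) (s.2.2.getD (i + PySem.List.pyGetD tab i 0) 0 + 1)))
    (PySem.Dict.empty, PySem.Dict.empty, PySem.Dict.empty)
  [s.1, s.2.1, s.2.2].foldl (fun t d => d.values.foldl (fun t c => t + c * (c - 1)) t) 0

-- ===== PRECONDITION & SPEC =====
-- Pre_f: Python's tab[i] with i in range(8) raises IndexError when len(tab) < 8.
def Pre_f (tab : List Int) : Prop := 8 ≤ tab.length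
instance (tab : List Int) : Decidable (Pre_f tab) := by unfold Pre_f; infer_instance
def pvWitness_f : List Int := [0, 4, 7, 5, 2, 6, 1, 3]
def Spec_f (tab : List Int) (out : Int) : Prop := out = f_alt tab
instance (tab : List Int) (out : Int) : Decidable (Spec_f tab out) := by unfold Spec_f; infer_instance

-- ===== CLAIM (what is proved, stated in full; the proofs are below) =====
def Claim_equal_f : Prop := ∀ (tab : List Int), Dom_f tab → Pre_f tab → Spec_f tab (f tab)

-- ===== LEMMAS AND PROOFS =====

-- number of ordered pairs of distinct positions holding equal values, counted via counts
def sumPairs (ks : List Int) : Int := (ks.map (fun x => (ks.count x : Int) - 1)).sum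

lemma sum_map_ite_single (s : List Int) (k : Int) (h : Int → Int)
    (hs : s.Nodup) (hk : k ∈ s) :
    (s.map (fun x => if x = k then h x else 0)).sum = h k := by
  induction s with
  | nil => cases hk
  | cons a t ih =>
    by_cases hak : a = k
    · subst hak
      simp only [List.map_cons, List.sum_cons]
      have hz : ∀ x ∈ t, (if x = a then h x else 0) = 0 := by
        intro x hx
        have hxa : x ≠ a := fun e => (List.nodup_cons.mp hs).1 (e ▸ hx)
        simp [hxa]
      rw [List.map_congr_left hz]
      simp
    · have hk' : k ∈ t := by
        rcases List.mem_cons.mp hk with h1 | h1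
        · exact absurd h1.symm hak
        · exact h1
      simp only [List.map_cons, List.sum_cons, if_neg hak]
      rw [ih (List.nodup_cons.mp hs).2 hk']
      ring

lemma group_sum (ks : List Int) (g : Int → Int) :
    ((PySem.Set.ofList ks).map (fun x => (ks.count x : Int) * g x)).sum
      = (ks.map g).sum := by
  induction ks using List.reverseRecOn with
  | nil => simp [PySem.Set.ofList]
  | append_singleton ks k ih =>
    have hofl : PySem.Set.ofList (ks ++ [k]) = PySem.Set.add (PySem.Set.ofList ks) k := by
      simp [PySem.Set.ofList_eq_foldl, List.foldl_append]
    have hcount : ∀ x : Int, ((ks ++ [k]).count x : Int)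
        = (ks.count x : Int) + (if x = k then 1 else 0) := by
      intro x
      rw [List.count_append]
      by_cases hx : x = k
      · subst hx; simp
      · have h0 : List.count x [k] = 0 := by
          rw [List.count_eq_zero]
          simp [hx]
        simp [h0, hx]
    by_cases hmem : PySem.Set.contains (PySem.Set.ofList ks) k = true
    · have hk : k ∈ PySem.Set.ofList ks := by
        simpa [PySem.Set.contains] using hmem
      rw [hofl, PySem.Set.add, if_pos hmem]
      have hsplit : ∀ x ∈ PySem.Set.ofList ks,
          ((ks ++ [k]).count x : Int) * g x
            = (ks.count x : Int) * g x + (if x = k then g x else 0) := by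
        intro x _
        rw [hcount]
        by_cases hx : x = k
        · simp [hx]
          ring
        · simp [hx]
      rw [List.map_congr_left hsplit, PySem.List.sum_map_add_int,
        ih, sum_map_ite_single _ k g (PySem.Set.nodup_ofList ks) hk]
      simp
    · have hknot : k ∉ ks := fun hkk =>
        hmem (by simpa [PySem.Set.contains] using (PySem.Set.mem_ofList ks k).mpr hkk)
      rw [hofl, PySem.Set.add, if_neg hmem]
      have hsame : ∀ x ∈ PySem.Set.ofList ks,
          ((ks ++ [k]).count x : Int) * g x = (ks.count x : Int) * g x := by
        intro x hx
        have hx' : x ≠ k := fun e => hknot (e ▸ (PySem.Set.mem_ofList ks x).mp hx)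
        rw [hcount, if_neg hx']
        ring
      have hck : ((ks ++ [k]).count k : Int) = 1 := by
        rw [hcount, if_pos rfl]
        simp [List.count_eq_zero_of_not_mem hknot]
      rw [List.map_append, List.sum_append, List.map_congr_left hsame, ih]
      simp [List.count_eq_zero_of_not_mem hknot]

lemma counter_values_sum (ks : List Int) :
    (((PySem.Dict.counter ks).values).map (fun c => c * (c - 1))).sum = sumPairs ks := by
  have hv : (PySem.Dict.counter ks).values
      = (PySem.Set.ofList ks).map (fun k => (ks.count k : Int)) := by
    show ((PySem.Dict.counter ks).items).map Prod.snd = _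
    rw [PySem.Dict.items_counter, List.map_map]
    rfl
  rw [hv, List.map_map]
  have := group_sum ks (fun x => (ks.count x : Int) - 1)
  calc ((PySem.Set.ofList ks).map ((fun c => c * (c - 1)) ∘ fun k => (ks.count k : Int))).sum
      = ((PySem.Set.ofList ks).map (fun x => (ks.count x : Int) * ((ks.count x : Int) - 1))).sum := rfl
    _ = (ks.map (fun x => (ks.count x : Int) - 1)).sum := group_sum ks _
    _ = sumPairs ks := rfl

lemma countP_anti_self (R : List Int) (hR : R.Nodup) {i : Int} (hi : i ∈ R)
    (q : Int → Prop) [DecidablePred q] (hq : q i) :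
    R.countP (fun j => decide (q j ∧ j ≠ i)) + 1 = R.countP (fun j => decide (q j)) := by
  induction R with
  | nil => cases hi
  | cons a t ih =>
    have hnd := List.nodup_cons.mp hR
    by_cases hai : a = i
    · subst hai
      have ht : ∀ j ∈ t, (decide (q j ∧ j ≠ a)) = (decide (q j)) := by
        intro j hj
        have hja : j ≠ a := fun e => hnd.1 (e ▸ hj)
        simp [hja]
      rw [List.countP_cons, List.countP_cons,
        List.countP_congr (fun x hx => by rw [ht x hx])]
      simp [hq]
    · have hi' : i ∈ t := by
        rcases List.mem_cons.mp hi with h1 | h1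
        · exact absurd h1.symm hai
        · exact h1
      rw [List.countP_cons, List.countP_cons, ← ih hnd.2 hi']
      by_cases hqa : q a
      · simp [hqa, hai]
      · simp [hqa]

lemma countP_or_split (R : List Int) (P Q : Int → Prop)
    [DecidablePred P] [DecidablePred Q] (h : ∀ x, ¬(P x ∧ Q x)) :
    R.countP (fun j => decide (P j ∨ Q j))
      = R.countP (fun j => decide (P j)) + R.countP (fun j => decide (Q j)) := by
  induction R with
  | nil => simp
  | cons a t ih =>
    rw [List.countP_cons, List.countP_cons, List.countP_cons, ih]
    by_cases hp : P a
    · have hnq : ¬ Q a := fun hqq => h a ⟨hp, hqq⟩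
      simp [hp, hnq]
      omega
    · by_cases hq : Q a
      · simp [hp, hq]
        omega
      · simp [hp, hq]

lemma sum_countP_eq (R : List Int) (hR : R.Nodup) (key : Int → Int) :
    (R.map (fun i => (R.countP (fun j => decide (key i = key j ∧ i ≠ j)) : Int))).sum
      = sumPairs (R.map key) := by
  unfold sumPairs
  rw [List.map_map]
  apply congrArg List.sum
  apply List.map_congr_left
  intro i hi
  have h1 : (R.map key).count (key i) = R.countP (fun j => decide (key j = key i)) := by
    simp only [List.count, List.countP_map]
    apply List.countP_congr
    intro j _
    simp only [Function.comp_apply, beq_iff_eq, decide_eq_true_eq]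
  have h2 : R.countP (fun j => decide (key i = key j ∧ j ≠ i)) + 1
      = R.countP (fun j => decide (key i = key j)) :=
    countP_anti_self R hR hi (fun j => key i = key j) rfl
  have h3 : R.countP (fun j => decide (key i = key j ∧ i ≠ j))
      = R.countP (fun j => decide (key i = key j ∧ j ≠ i)) := by
    apply List.countP_congr
    intro j _
    simp [ne_comm]
  have h4 : R.countP (fun j => decide (key j = key i))
      = R.countP (fun j => decide (key i = key j)) := by
    apply List.countP_congr
    intro j _
    simp [eq_comm]
  simp only [Function.comp]
  omega

lemma dloop (R : List Int) (hR : R.Nodup) (key : Int → Int) (c : Int) :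
    R.foldl (fun c i => R.foldl (fun c j => if key i = key j ∧ i ≠ j then c + 1 else c) c) c
      = c + sumPairs (R.map key) := by
  rw [PySem.List.foldl_congr_mem R _
    (fun c i => c + (R.countP (fun j => decide (key i = key j ∧ i ≠ j)) : Int)) c
    (fun acc i _ => PySem.List.foldl_ite_add_one _ R acc)]
  rw [PySem.List.foldl_add, sum_countP_eq R hR key]

-- the per-pair case split behind the second check: |vi - vj| = |i - j| splits into the
-- diagonal and anti-diagonal key equalities, mutually exclusive for i ≠ j
lemma abs_pair_iff (i j a b : Int) :
    (|a - b| = |i - j| ∧ i ≠ j) ↔ ((i - a = j - b ∧ i ≠ j) ∨ (i + a = j + b ∧ i ≠ j)) := by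
  rw [Int.abs_eq_natAbs, Int.abs_eq_natAbs]
  omega

-- A in closed form: sum of the three pair counts
lemma f_eq (tab : List Int) :
    f tab = sumPairs ((PySem.List.pyRange 0 8 1).map (fun i => PySem.List.pyGetD tab i 0))
      + (sumPairs ((PySem.List.pyRange 0 8 1).map (fun i => i - PySem.List.pyGetD tab i 0))
        + sumPairs ((PySem.List.pyRange 0 8 1).map (fun i => i + PySem.List.pyGetD tab i 0))) := by
  have hnd : (PySem.List.pyRange 0 8 1).Nodup := PySem.List.nodup_pyRange_one 0 8
  simp only [f]
  rw [dloop _ hnd (fun i => PySem.List.pyGetD tab i 0) 0]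
  rw [PySem.List.foldl_congr_mem _ _
    (fun c i => c
      + (((PySem.List.pyRange 0 8 1).countP (fun j => decide (i - PySem.List.pyGetD tab i 0 = j - PySem.List.pyGetD tab j 0 ∧ i ≠ j)) : Int)
        + ((PySem.List.pyRange 0 8 1).countP (fun j => decide (i + PySem.List.pyGetD tab i 0 = j + PySem.List.pyGetD tab j 0 ∧ i ≠ j)) : Int))) _ ?_]
  · rw [PySem.List.foldl_add, PySem.List.sum_map_add_int,
      sum_countP_eq _ hnd (fun i => i - PySem.List.pyGetD tab i 0),
      sum_countP_eq _ hnd (fun i => i + PySem.List.pyGetD tab i 0)]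
    ring
  · intro acc i _
    rw [PySem.List.foldl_congr_mem _ _
      (fun c j => if ((i - PySem.List.pyGetD tab i 0 = j - PySem.List.pyGetD tab j 0 ∧ i ≠ j)
          ∨ (i + PySem.List.pyGetD tab i 0 = j + PySem.List.pyGetD tab j 0 ∧ i ≠ j))
        then c + 1 else c) acc
      (fun c j _ => by rw [if_congr (abs_pair_iff i j _ _) rfl rfl])]
    rw [PySem.List.foldl_ite_add_one _ _ acc]
    rw [countP_or_split _ _ _ (fun x => by rintro ⟨⟨h1, hne⟩, ⟨h2, _⟩⟩; exact hne (by omega))]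
    push_cast
    ring

-- one frequency-table build in closed form
lemma build_sum (R : List Int) (key : Int → Int) :
    (((R.foldl (fun d i => d.insert (key i) (d.getD (key i) 0 + 1)) PySem.Dict.empty).values).map
      (fun c => c * (c - 1))).sum = sumPairs (R.map key) := by
  rw [← List.foldl_map (f := key) (g := fun d x => PySem.Dict.insert d x (PySem.Dict.getD d x 0 + 1))]
  rw [PySem.Dict.foldl_insert_getD_add_one_eq_counter, counter_values_sum]

-- B in closed form: the same sum of three pair counts
lemma f_alt_eq (tab : List Int) :
    f_alt tab = sumPairs ((PySem.List.pyRange 0 8 1).map (fun i => PySem.List.pyGetD tab i 0))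
      + (sumPairs ((PySem.List.pyRange 0 8 1).map (fun i => i - PySem.List.pyGetD tab i 0))
        + sumPairs ((PySem.List.pyRange 0 8 1).map (fun i => i + PySem.List.pyGetD tab i 0))) := by
  simp only [f_alt]
  rw [PySem.List.foldl_prod_mk
    (f := fun d i => PySem.Dict.insert d (PySem.List.pyGetD tab i 0) (PySem.Dict.getD d (PySem.List.pyGetD tab i 0) 0 + 1))
    (g := fun (s : PySem.Dict Int Int × PySem.Dict Int Int) i =>
      (PySem.Dict.insert s.1 (i - PySem.List.pyGetD tab i 0) (PySem.Dict.getD s.1 (i - PySem.List.pyGetD tab i 0) 0 + 1),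
       PySem.Dict.insert s.2 (i + PySem.List.pyGetD tab i 0) (PySem.Dict.getD s.2 (i + PySem.List.pyGetD tab i 0) 0 + 1)))]
  rw [PySem.List.foldl_prod_mk
    (f := fun d i => PySem.Dict.insert d (i - PySem.List.pyGetD tab i 0) (PySem.Dict.getD d (i - PySem.List.pyGetD tab i 0) 0 + 1))
    (g := fun d i => PySem.Dict.insert d (i + PySem.List.pyGetD tab i 0) (PySem.Dict.getD d (i + PySem.List.pyGetD tab i 0) 0 + 1))]
  simp only [List.foldl_cons, List.foldl_nil]
  rw [PySem.List.foldl_add (g := fun c => c * (c - 1)),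
    PySem.List.foldl_add (g := fun c => c * (c - 1)),
    PySem.List.foldl_add (g := fun c => c * (c - 1))]
  rw [build_sum _ (fun i => PySem.List.pyGetD tab i 0),
    build_sum _ (fun i => i - PySem.List.pyGetD tab i 0),
    build_sum _ (fun i => i + PySem.List.pyGetD tab i 0)]
  ring

-- ===== VERDICT (by name: the statement is the Claim_ definition above) =====
theorem f_spec : Claim_equal_f := by
  intro tab _ _
  unfold Spec_f
  rw [f_eq, f_alt_eq]
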